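-- pv_equiv track=rewrite | github.com/akashdeep3194/Scaler | d51/Sort Array in given Order.py | solve
-- ===== SOURCE A (Python) =====
-- def solve(A, B):
--     A.sort()
--     dc = dict()
--     ctr = 0
--     ans = []
--     for ele in A:
--         dc[ele] = dc.get(ele, 0) + 1
--     for ele in B:
--         ctr = dc.get(ele, 0)
--         while ctr > 0:
--             ans.append(ele)
--             dc[ele] -= 1
--             ctr -= 1
--     for ele in A:
--         if dc[ele] > 0:
--             ans.append(ele)
--     return ans
-- ===== SOURCE B (Python) =====
-- def solve(A, B):
--     A.sort()
--     seen = set()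
--     out = []
--     for b in B:
--         if b not in seen:
--             seen.add(b)
--             out += [x for x in A if x == b]
--     out += [x for x in A if x not in seen]
--     return out
-- ===== Notes on version B (the rewrite author's own statement) =====
-- stated objective: simpler
-- what changed: Replaces A's occurrence-counter dict, ctr-driven while-emission loop and leftover-count third pass by a dedup-and-filter formulation: for each first occurrence in B append the matching run of sorted A via a filter, then append the elements of sorted A not in B via one more filter.
import Mathlib
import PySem

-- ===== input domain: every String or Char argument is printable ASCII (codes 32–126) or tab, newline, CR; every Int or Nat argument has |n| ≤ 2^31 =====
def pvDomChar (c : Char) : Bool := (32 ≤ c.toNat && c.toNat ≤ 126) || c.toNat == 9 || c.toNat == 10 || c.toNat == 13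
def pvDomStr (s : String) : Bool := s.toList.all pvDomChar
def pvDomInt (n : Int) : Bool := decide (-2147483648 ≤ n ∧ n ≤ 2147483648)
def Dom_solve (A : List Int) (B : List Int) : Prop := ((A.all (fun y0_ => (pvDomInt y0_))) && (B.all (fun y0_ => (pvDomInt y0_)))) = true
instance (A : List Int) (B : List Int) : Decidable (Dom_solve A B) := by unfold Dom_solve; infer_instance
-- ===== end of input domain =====

-- B replaces A's counter-dict + while-emission + leftover pass by dedup-then-filter passes (simpler,
-- not faster). Both A and B sort the argument list A in place; equivalence here is about the return value
-- (B performs the same A.sort() mutation).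

-- ===== PORT A =====
-- the inner 'while ctr > 0' loop of A: emits ele, decrements dc[ele] and ctr
-- (dc[ele] -= 1 is ported as insert of getD - 1; when it runs the key is always present, so this is exact)
def solveEmit (ele : Int) (ctr : Int) (dc : PySem.Dict Int Int) (ans : List Int) :
    PySem.Dict Int Int × List Int :=
  if ctr > 0 then
    solveEmit ele (ctr - 1) (dc.insert ele (dc.getD ele 0 - 1)) (ans ++ [ele])
  else (dc, ans)
termination_by ctr.toNat
decreasing_by omega

def solve (A : List Int) (B : List Int) : List Int :=
  let S := PySem.List.sorted A (fun x => x) false     -- A.sort()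
  let dc : PySem.Dict Int Int :=
    S.foldl (fun d ele => d.insert ele (d.getD ele 0 + 1)) PySem.Dict.empty
  let st := B.foldl (fun (st : PySem.Dict Int Int × List Int) ele =>
    solveEmit ele (st.1.getD ele 0) st.1 st.2) (dc, [])
  -- third loop: dc[ele] raises on a missing key, but every ele of S is a key of dc; getD is exact here
  S.foldl (fun ans ele => if st.1.getD ele 0 > 0 then ans ++ [ele] else ans) st.2

-- ===== PORT B =====
def solve_alt (A : List Int) (B : List Int) : List Int :=
  let S := PySem.List.sorted A (fun x => x) false     -- A.sort()
  let st := B.foldl (fun (st : PySem.Set Int × List Int) b =>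
    if st.1.contains b then st
    else (st.1.add b, st.2 ++ S.filter (fun x => x == b))) (PySem.Set.empty, [])
  st.2 ++ S.filter (fun x => !(st.1.contains x))

-- ===== PRECONDITION & SPEC =====
def Spec_solve (A : List Int) (B : List Int) (out : List Int) : Prop := out = solve_alt A B
instance (A : List Int) (B : List Int) (out : List Int) : Decidable (Spec_solve A B out) := by unfold Spec_solve; infer_instance

-- ===== CLAIM (what is proved, stated in full; the proofs are below) =====
def Claim_equal_solve : Prop := ∀ (A : List Int) (B : List Int), Dom_solve A B → Spec_solve A B (solve A B)

-- ===== LEMMAS AND PROOFS =====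

lemma solveEmit_spec (ele : Int) : ∀ (n : Nat) (ctr : Int), ctr.toNat = n → ∀ dc ans,
    (solveEmit ele ctr dc ans).2 = ans ++ List.replicate n ele ∧
    ∀ x, (solveEmit ele ctr dc ans).1.getD x 0 =
      dc.getD x 0 - (if x = ele then (n : Int) else 0) := by
  intro n
  induction n with
  | zero =>
    intro ctr h dc ans
    rw [solveEmit]
    have : ¬ ctr > 0 := by omega
    simp [this]
  | succ n ih =>
    intro ctr h dc ans
    have hpos : ctr > 0 := by omega
    rw [solveEmit]
    simp only [hpos, if_pos]
    obtain ⟨h1, h2⟩ := ih (ctr - 1) (by omega) (dc.insert ele (dc.getD ele 0 - 1)) (ans ++ [ele])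
    refine ⟨?_, ?_⟩
    · rw [h1, List.replicate_succ, List.append_assoc, List.singleton_append]
    · intro x
      rw [h2 x, PySem.Dict.getD_insert]
      by_cases hx : x = ele
      · simp [hx]; omega
      · simp [hx]

lemma loop_inv (S : List Int) (B : List Int) : ∀ (seen : PySem.Set Int)
    (dc : PySem.Dict Int Int) (ans : List Int),
    (∀ x, dc.getD x 0 = if seen.contains x then 0 else (S.count x : Int)) →
    (B.foldl (fun (st : PySem.Dict Int Int × List Int) ele =>
        solveEmit ele (st.1.getD ele 0) st.1 st.2) (dc, ans)).2 =
      (B.foldl (fun (st : PySem.Set Int × List Int) b =>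
        if st.1.contains b then st
        else (st.1.add b, st.2 ++ S.filter (fun x => x == b))) (seen, ans)).2 ∧
    ∀ x, (B.foldl (fun (st : PySem.Dict Int Int × List Int) ele =>
        solveEmit ele (st.1.getD ele 0) st.1 st.2) (dc, ans)).1.getD x 0 =
      if (B.foldl (fun (st : PySem.Set Int × List Int) b =>
        if st.1.contains b then st
        else (st.1.add b, st.2 ++ S.filter (fun x => x == b))) (seen, ans)).1.contains x
      then 0 else (S.count x : Int) := by
  induction B with
  | nil => intro seen dc ans hinv; exact ⟨rfl, hinv⟩
  | cons b B ih =>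
    intro seen dc ans hinv
    simp only [List.foldl_cons]
    by_cases hb : seen.contains b
    · -- already seen: dc.getD b 0 = 0, the while loop emits nothing
      have h0 : dc.getD b 0 = 0 := by rw [hinv b, if_pos hb]
      have hemit := solveEmit_spec b 0 (dc.getD b 0) (by omega) dc ans
      have hfst : (solveEmit b (dc.getD b 0) dc ans) = (dc, ans) := by
        rw [solveEmit]; simp [h0]
      rw [hfst, if_pos hb]
      exact ih seen dc ans hinv
    · -- first occurrence of b: the while loop emits count-of-b copies and zeroes dc[b]
      have h0 : dc.getD b 0 = (S.count b : Int) := by rw [hinv b, if_neg hb]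
      obtain ⟨h1, h2⟩ := solveEmit_spec b (S.count b) (dc.getD b 0) (by omega) dc ans
      have hfilter : S.filter (fun x => x == b) = List.replicate (S.count b) b :=
        List.filter_beq (a := b)
      have heq : (solveEmit b (dc.getD b 0) dc ans) =
          ((solveEmit b (dc.getD b 0) dc ans).1, ans ++ S.filter (fun x => x == b)) := by
        rw [hfilter]; exact Prod.ext rfl h1
      rw [heq, if_neg hb]
      apply ih
      intro x
      rw [h2 x]
      by_cases hx : x = b
      · subst hx
        have : (seen.add x).contains x := by
          simp [PySem.Set.mem_add]
        rw [if_pos this, h0]; omega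
      · have : (seen.add b).contains x = seen.contains x := by
          apply Bool.eq_iff_iff.mpr
          simp only [PySem.Set.contains_iff, PySem.Set.mem_add]
          constructor
          · rintro (hm | hm)
            · exact hm
            · exact absurd hm hx
          · exact Or.inl
        rw [this, hinv x]
        simp [hx]

lemma third_loop (S : List Int) (dc2 : PySem.Dict Int Int) (seen2 : PySem.Set Int)
    (ans : List Int)
    (h : ∀ x, dc2.getD x 0 = if seen2.contains x then 0 else (S.count x : Int)) :
    S.foldl (fun ans ele => if dc2.getD ele 0 > 0 then ans ++ [ele] else ans) ans =
    ans ++ S.filter (fun x => !(seen2.contains x)) := by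
  rw [PySem.List.foldl_append_ite_eq_filter]
  congr 1
  apply List.filter_congr
  intro x hx
  have hc : 0 < S.count x := List.count_pos_iff.mpr hx
  rw [h x]
  by_cases hs : x ∈ seen2
  · simp [hs]
  · simp [hs]
    exact hx

-- ===== VERDICT (by name: the statement is the Claim_ definition above) =====
theorem solve_spec : Claim_equal_solve := by
  intro A B _
  unfold Spec_solve solve solve_alt
  set S := PySem.List.sorted A (fun x => x) false with hS
  have hdc : ∀ x, (S.foldl (fun d ele => d.insert ele (d.getD ele 0 + 1))
      PySem.Dict.empty).getD x 0 = if (PySem.Set.empty (α := Int)).contains x then 0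
        else (S.count x : Int) := by
    intro x
    rw [PySem.Dict.getD_foldl_insert_add_one]
    simp [PySem.Dict.getD_empty, PySem.Set.empty]
  obtain ⟨h1, h2⟩ := loop_inv S B PySem.Set.empty _ [] hdc
  simp only
  rw [third_loop S _ _ _ h2, h1]
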